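-- pv_equiv track=rewrite | github.com/BoJakobsen/AoC2023 | src/puz_12.py | checkit
-- ===== SOURCE A (Python) =====
-- def checkit(rec,contgrp,fill):
--     ingrp=False
--     cnt=0
--     k=0
--     contgrp_test=[]
--     for ch in rec:
--         if ch == '?':
--             ch=fill[k]
--             k+=1
--         if ch == '#' and not ingrp:
--             ingrp=True
--             cnt+=1
--         elif ch =='#' and ingrp:
--             cnt+=1
--         elif ch =='.' and ingrp:
--             ingrp=False
--             contgrp_test.append(cnt)
--             cnt=0
--     if ingrp : # handle end case
--             contgrp_test.append(cnt)
--     if contgrp == contgrp_test: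
--         res= True
--     else :
--         res=False
--     return res
-- ===== SOURCE B (Python) =====
-- def checkit(rec, contgrp, fill):
--     # Build the filled record by interleaving the '?'-split pieces with fill,
--     # then read the group sizes off a '.'-split in one expression.
--     parts = rec.split('?')
--     filled = parts[0]
--     for ch, part in zip(fill, parts[1:]):
--         filled += ch + part
--     groups = [seg.count('#') for seg in filled.split('.') if '#' in seg]
--     return contgrp == groups
-- ===== Notes on version B (the rewrite author's own statement) =====
-- stated objective: simpler
-- what changed: Replaces A's per-character ingrp/cnt state machine with a build-then-split pass: interleave rec.split('?') with fill to get the filled record, then read the group sizes off one '.'-split as [seg.count('#') for seg in filled.split('.') if '#' in seg].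
import Mathlib
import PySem

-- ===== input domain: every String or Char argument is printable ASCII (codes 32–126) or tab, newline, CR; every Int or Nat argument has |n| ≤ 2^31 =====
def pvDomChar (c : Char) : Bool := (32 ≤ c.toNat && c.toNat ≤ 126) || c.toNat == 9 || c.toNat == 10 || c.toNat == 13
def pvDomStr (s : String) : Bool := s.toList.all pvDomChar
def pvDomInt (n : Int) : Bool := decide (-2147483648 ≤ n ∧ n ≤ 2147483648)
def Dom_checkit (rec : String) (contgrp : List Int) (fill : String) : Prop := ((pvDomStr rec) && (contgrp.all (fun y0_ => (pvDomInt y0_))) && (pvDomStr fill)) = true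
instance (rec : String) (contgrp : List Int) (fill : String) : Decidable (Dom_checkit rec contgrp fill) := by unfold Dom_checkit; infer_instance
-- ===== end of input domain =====

-- B builds the filled record by interleaving rec.split('?') with fill and reads the
-- group sizes off one '.'-split, replacing A's explicit ingrp/cnt state machine (simpler; a timing run measured it faster).

-- ===== PORT A =====
-- A's for-loop: state (ingrp, cnt, k, contgrp_test); 'fill[k]' is pyGet? (none = IndexError).
def checkitLoop (fill : List Char) : List Char → Bool → Int → Int → List Int → Option (Bool × Int × List Int)
  | [], ingrp, cnt, _k, acc => some (ingrp, cnt, acc)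
  | ch0 :: rest, ingrp, cnt, k, acc =>
    match (if ch0 = '?' then PySem.List.pyGet? fill k else some ch0) with
    | none => none
    | some ch =>
      let k' := if ch0 = '?' then k + 1 else k
      if ch = '#' && !ingrp then checkitLoop fill rest true (cnt + 1) k' acc
      else if ch = '#' && ingrp then checkitLoop fill rest ingrp (cnt + 1) k' acc
      else if ch = '.' && ingrp then checkitLoop fill rest false 0 k' (acc ++ [cnt])
      else checkitLoop fill rest ingrp cnt k' acc

def checkit (rec : String) (contgrp : List Int) (fill : String) : Bool :=
  match checkitLoop fill.toList rec.toList false 0 0 [] with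
  | none => false   -- IndexError in Python; excluded by Pre_checkit
  | some (ingrp, cnt, acc) =>
      let contgrp_test := if ingrp then acc ++ [cnt] else acc
      decide (contgrp = contgrp_test)

-- ===== PORT B =====
def checkit_alt (rec : String) (contgrp : List Int) (fill : String) : Bool :=
  let parts := rec.toList.splitOn '?'
  let filled := (fill.toList.zip parts.tail).foldl (fun acc p => acc ++ p.1 :: p.2) parts.headI
  let groups := ((filled.splitOn '.').filter (fun seg => seg.contains '#')).map
      (fun seg => (seg.count '#' : Int))
  decide (contgrp = groups)

-- ===== PRECONDITION & SPEC =====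
-- Pre_ excludes exactly the inputs where rec has more '?' than fill has characters:
-- there A raises IndexError at 'fill[k]'.
def Pre_checkit (rec : String) (contgrp : List Int) (fill : String) : Prop :=
  rec.toList.count '?' ≤ fill.toList.length
instance (rec : String) (contgrp : List Int) (fill : String) : Decidable (Pre_checkit rec contgrp fill) := by unfold Pre_checkit; infer_instance

def pvWitness_checkit : String × List Int × String := ("?#?.##", [2, 2], "#.")

def Spec_checkit (rec : String) (contgrp : List Int) (fill : String) (out : Bool) : Prop := out = checkit_alt rec contgrp fill
instance (rec : String) (contgrp : List Int) (fill : String) (out : Bool) : Decidable (Spec_checkit rec contgrp fill out) := by unfold Spec_checkit; infer_instance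

-- ===== CLAIM (what is proved, stated in full; the proofs are below) =====
def Claim_equal_checkit : Prop := ∀ (rec : String) (contgrp : List Int) (fill : String), Dom_checkit rec contgrp fill → Pre_checkit rec contgrp fill → Spec_checkit rec contgrp fill (checkit rec contgrp fill)

-- ===== LEMMAS AND PROOFS =====

-- the '?'-substitution of A, made explicit: consume fill left to right (none = fill exhausted)
def fillChars : List Char → List Char → Option (List Char)
  | _f, [] => some []
  | f, c :: cs =>
    if c = '?' then
      match f with
      | [] => none
      | fc :: fs => (fillChars fs cs).map (fc :: ·)
    else (fillChars f cs).map (c :: ·)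

-- A's loop on an already-filled record (no '?' handling, no index)
def machineSt : List Char → Bool → Int → List Int → Bool × Int × List Int
  | [], ingrp, cnt, acc => (ingrp, cnt, acc)
  | ch :: rest, ingrp, cnt, acc =>
    if ch = '#' && !ingrp then machineSt rest true (cnt + 1) acc
    else if ch = '#' && ingrp then machineSt rest ingrp (cnt + 1) acc
    else if ch = '.' && ingrp then machineSt rest false 0 (acc ++ [cnt])
    else machineSt rest ingrp cnt acc

def finishSt : Bool × Int × List Int → List Int
  | (ingrp, cnt, acc) => if ingrp then acc ++ [cnt] else acc

-- group list read off a filled record, A-style (grF = not in group, grT = in group with count)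
mutual
def grF : List Char → List Int
  | [] => []
  | c :: cs => if c = '#' then grT cs 1 else grF cs
def grT : List Char → Int → List Int
  | [], cnt => [cnt]
  | c :: cs, cnt =>
    if c = '#' then grT cs (cnt + 1) else if c = '.' then cnt :: grF cs else grT cs cnt
end

-- group list read off a filled record, B-style
def gB (l : List Char) : List Int :=
  ((l.splitOn '.').filter (fun seg => seg.contains '#')).map (fun seg => (seg.count '#' : Int))

theorem loop_fill (fill : List Char) (rec : List Char) :
    ∀ (n : Nat) (ingrp : Bool) (cnt : Int) (acc : List Int),
      checkitLoop fill rec ingrp cnt (n : Int) acc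
        = (fillChars (fill.drop n) rec).map (fun filled => machineSt filled ingrp cnt acc) := by
  induction rec with
  | nil => intro n ingrp cnt acc; simp [checkitLoop, fillChars, machineSt]
  | cons c cs ih =>
    intro n ingrp cnt acc
    by_cases hc : c = '?'
    · subst hc
      cases hd : fill.drop n with
      | nil =>
        have : fill[n]? = none := by rw [← List.head?_drop, hd]; rfl
        simp [checkitLoop, fillChars, PySem.List.pyGet?_natCast, this]
      | cons f0 fs =>
        have hget : fill[n]? = some f0 := by rw [← List.head?_drop, hd]; rfl
        have hdrop : List.drop (n + 1) fill = fs := by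
          rw [List.drop_add_one_eq_tail_drop, hd]; rfl
        have hstep : ∀ (ig : Bool) (ct : Int) (ac : List Int),
            checkitLoop fill cs ig ct ((n : Int) + 1) ac
              = (fillChars fs cs).map (fun filled => machineSt filled ig ct ac) := by
          intro ig ct ac
          rw [show ((n : Int) + 1) = ((n + 1 : Nat) : Int) by push_cast; ring, ih (n + 1), hdrop]
        simp only [checkitLoop, PySem.List.pyGet?_natCast, hget, fillChars, ite_true]
        cases hfc : fillChars fs cs with
        | none => simp [hstep, hfc]
        | some filled =>
          by_cases h1 : f0 = '#'
          · cases ingrp <;> simp [h1, machineSt, hstep, hfc]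
          · by_cases h2 : f0 = '.'
            · cases ingrp <;> simp [h2, machineSt, hstep, hfc]
            · cases ingrp <;> simp [h1, h2, machineSt, hstep, hfc]
    · simp only [checkitLoop, if_neg hc, fillChars]
      cases hfc : fillChars (fill.drop n) cs with
      | none => simp [ih n, hfc]
      | some filled =>
        by_cases h1 : c = '#'
        · cases ingrp <;> simp [h1, machineSt, ih n, hfc]
        · by_cases h2 : c = '.'
          · cases ingrp <;> simp [h2, machineSt, ih n, hfc]
          · cases ingrp <;> simp [h1, h2, machineSt, ih n, hfc]

theorem fill_interleave : ∀ (rec fill : List Char), rec.count '?' ≤ fill.length →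
    fillChars fill rec
      = some ((rec.splitOn '?').headI ++ (fill.zip (rec.splitOn '?').tail).flatMap (fun p => p.1 :: p.2)) := by
  intro rec
  induction rec with
  | nil => intro fill _; simp [fillChars, List.splitOn, List.splitOnP_nil]
  | cons c cs ih =>
    intro fill hle
    obtain ⟨h0, t, hsplit⟩ : ∃ h0 t, cs.splitOn '?' = h0 :: t := by
      cases h : cs.splitOn '?' with
      | nil => exact absurd h (List.splitOnP_ne_nil _ cs)
      | cons a b => exact ⟨a, b, rfl⟩
    by_cases hc : c = '?'
    · subst hc
      simp only [List.count_cons, beq_self_eq_true, if_pos] at hle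
      cases fill with
      | nil => simp at hle
      | cons f0 fs =>
        have hcs : cs.count '?' ≤ fs.length := by simp at hle; omega
        have hsp : ('?' :: cs).splitOn '?' = [] :: cs.splitOn '?' := by
          simp [List.splitOn, List.splitOnP_cons]
        rw [hsp]
        simp only [fillChars, ih fs hcs, Option.map_some]
        simp [hsplit]
    · have hcs : cs.count '?' ≤ fill.length := by
        simp [hc] at hle; omega
      have hsp : (c :: cs).splitOn '?' = (c :: h0) :: t := by
        simp [List.splitOn] at hsplit ⊢
        simp [hc, hsplit]
      rw [hsp]
      simp only [fillChars, if_neg hc, ih fill hcs, Option.map_some]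
      simp [hsplit]

theorem machine_gr : ∀ (l : List Char) (acc : List Int),
    (∀ cnt, finishSt (machineSt l true cnt acc) = acc ++ grT l cnt)
    ∧ finishSt (machineSt l false 0 acc) = acc ++ grF l := by
  intro l
  induction l with
  | nil =>
    intro acc
    exact ⟨fun cnt => by simp [machineSt, finishSt, grT], by simp [machineSt, finishSt, grF]⟩
  | cons c cs ih =>
    intro acc
    refine ⟨fun cnt => ?_, ?_⟩
    · by_cases h1 : c = '#'
      · simp [machineSt, h1, grT, (ih acc).1]
      · by_cases h2 : c = '.'
        · simp [machineSt, h2, grT, (ih (acc ++ [cnt])).2]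
        · simp [machineSt, h1, h2, grT, (ih acc).1]
    · by_cases h1 : c = '#'
      · simp [machineSt, h1, grF, (ih acc).1]
      · by_cases h2 : c = '.'
        · simp [machineSt, h2, grF, (ih acc).2]
        · simp [machineSt, h1, h2, grF, (ih acc).2]

-- splitOnP, split at the head: first piece = takeWhile, rest = split of what follows the first hit
theorem splitOnP_head (p : Char → Bool) : ∀ l : List Char,
    l.splitOnP p = l.takeWhile (fun c => !p c)
      :: (match l.dropWhile (fun c => !p c) with
          | [] => []
          | _ :: t => t.splitOnP p) := by
  intro l
  induction l with
  | nil => simp [List.splitOnP_nil]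
  | cons c cs ih =>
    by_cases hc : p c
    · simp [List.splitOnP_cons, hc]
    · simp [List.splitOnP_cons, hc, ih]

theorem gB_tail_match (cs : List Char) :
    (((match cs.dropWhile (fun c => !(c == '.')) with
       | [] => ([] : List (List Char))
       | _ :: t => t.splitOnP (fun x => x == '.')).filter
        (fun seg : List Char => seg.contains '#')).map
      (fun seg : List Char => (seg.count '#' : Int)))
    = gB ((cs.dropWhile (fun c => !(c == '.'))).tail) := by
  cases hd : cs.dropWhile (fun c => !(c == '.')) with
  | nil => simp [gB, List.splitOn, List.splitOnP_nil]
  | cons d t => simp [gB, List.splitOn]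

theorem gB_dot (cs : List Char) : gB ('.' :: cs) = gB cs := by
  simp [gB, List.splitOn, List.splitOnP_cons]

theorem gB_hash (cs : List Char) :
    gB ('#' :: cs) = (((cs.takeWhile (fun c => !(c == '.'))).count '#' : Int) + 1)
      :: gB ((cs.dropWhile (fun c => !(c == '.'))).tail) := by
  rw [← gB_tail_match cs]
  simp only [gB, List.splitOn, splitOnP_head (fun x => x == '.') ('#' :: cs)]
  simp

theorem gB_other (c : Char) (cs : List Char) (h1 : c ≠ '#') (h2 : c ≠ '.') :
    gB (c :: cs) = gB cs := by
  simp only [gB, List.splitOn, splitOnP_head (fun x => x == '.') (c :: cs),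
    splitOnP_head (fun x => x == '.') cs]
  simp [List.filter_cons, h2, Ne.symm h1]
  by_cases hm : '#' ∈ List.takeWhile (fun c => !(c == '.')) cs <;>
    simp [hm, h1]

theorem gr_gB : ∀ l : List Char,
    grF l = gB l
    ∧ ∀ cnt, grT l cnt
        = (cnt + ((l.takeWhile (fun c => !(c == '.'))).count '#' : Int))
            :: gB ((l.dropWhile (fun c => !(c == '.'))).tail) := by
  intro l
  induction l with
  | nil =>
    exact ⟨by simp [grF, gB, List.splitOn, List.splitOnP_nil],
           fun cnt => by simp [grT, gB, List.splitOn, List.splitOnP_nil]⟩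
  | cons c cs ih =>
    refine ⟨?_, fun cnt => ?_⟩
    · by_cases h1 : c = '#'
      · subst h1
        rw [grF, if_pos rfl, ih.2 1, gB_hash]
        congr 1
        ring
      · by_cases h2 : c = '.'
        · subst h2
          rw [grF, if_neg (by decide), ih.1, gB_dot]
        · rw [grF, if_neg h1, ih.1, gB_other c cs h1 h2]
    · by_cases h1 : c = '#'
      · subst h1
        rw [grT, if_pos rfl, ih.2 (cnt + 1)]
        simp
        ring
      · by_cases h2 : c = '.'
        · subst h2
          rw [grT, if_neg (by decide), if_pos rfl, ih.1]
          simp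
        · rw [grT, if_neg h1, if_neg h2, ih.2 cnt]
          simp [h1, h2]

-- ===== VERDICT (by name: the statement is the Claim_ definition above) =====
theorem checkit_spec : Claim_equal_checkit := by
  intro rec contgrp fill _hdom hpre
  unfold Spec_checkit checkit checkit_alt
  have hfc := fill_interleave rec.toList fill.toList hpre
  set filled := (rec.toList.splitOn '?').headI
      ++ (fill.toList.zip (rec.toList.splitOn '?').tail).flatMap (fun p => p.1 :: p.2) with hfd
  have hloop : checkitLoop fill.toList rec.toList false 0 0 []
      = some (machineSt filled false 0 []) := by
    have h := loop_fill fill.toList rec.toList 0 false 0 []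
    simp only [Nat.cast_zero, List.drop_zero] at h
    rw [h, hfc]; rfl
  rcases hst : machineSt filled false 0 [] with ⟨ingrp, cnt, acc⟩
  have h2 := (machine_gr filled []).2
  rw [hst] at h2
  simp only [finishSt, List.nil_append] at h2
  have hval : (if ingrp then acc ++ [cnt] else acc) = gB filled := h2.trans (gr_gB filled).1
  rw [hloop, hst]
  simp only [PySem.List.foldl_append_eq_flatMap]
  show decide (contgrp = if ingrp then acc ++ [cnt] else acc) = _
  rw [hval]
  rfl
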